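-- pv_equiv track=rewrite | github.com/ajayat/prologin-2024 | L'escalade de l'Yggdrasil/escalade.py | biggest_jump
-- ===== SOURCE A (Python) =====
-- from math import inf
-- from typing import List
--
-- def biggest_jump(n: int, differences: List[int]) -> None:
--     """
--     Parameters:
--         n: le nombre de branches de l'arbre moins 1
--         differences: la liste des différences en hauteur des branches consécutives
--     """
--     max_jump_before = 0
--     max_jump = -inf
--     cum_sum = 0
--     max_cum_sum = -inf
--
--     for i in range(n):
--         cum_sum += differences[i]
--         if differences[i] > max_jump:
--             max_jump = differences[i]
--         if cum_sum > max_cum_sum: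
--             max_cum_sum = cum_sum
--             max_jump_before = max_jump
--
--     return max_jump_before
-- ===== SOURCE B (Python) =====
-- def biggest_jump(n, differences):
--     # One pass to find `arg`, the first index whose prefix cumulative sum is
--     # maximal (strict-> update), then a separate max over the slice up to it.
--     if n <= 0:
--         return 0
--     cum = 0
--     best = None
--     arg = 0
--     for i in range(n):
--         cum += differences[i]
--         if best is None or cum > best:
--             best = cum
--             arg = i
--     return max(differences[:arg + 1])
-- ===== Notes on version B (the rewrite author's own statement) =====
-- stated objective: simpler
-- what changed: A fuses everything into one pass over four state variables (running max difference, cumulative sum, best prefix sum, and the answer recorded at each improvement); B decomposes the task: one pass records only the first argmax index of the prefix sums, then the answer is a separate max over the slice differences[:arg+1].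
import Mathlib
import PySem

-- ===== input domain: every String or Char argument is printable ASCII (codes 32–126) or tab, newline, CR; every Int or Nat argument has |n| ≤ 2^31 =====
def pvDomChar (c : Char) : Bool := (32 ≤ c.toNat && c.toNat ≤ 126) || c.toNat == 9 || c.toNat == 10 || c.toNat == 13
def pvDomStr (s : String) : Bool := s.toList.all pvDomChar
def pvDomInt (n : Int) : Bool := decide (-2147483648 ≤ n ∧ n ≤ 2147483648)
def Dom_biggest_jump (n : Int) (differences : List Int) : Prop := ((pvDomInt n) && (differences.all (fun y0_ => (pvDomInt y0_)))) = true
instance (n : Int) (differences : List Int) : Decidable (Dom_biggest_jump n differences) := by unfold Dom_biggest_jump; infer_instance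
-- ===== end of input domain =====

-- B replaces A's fused four-variable pass by one pass that records only the first
-- argmax index of the prefix sums, followed by a separate max over the slice up to
-- it (objective: simpler decomposition, same cost). Equivalence of RETURN values.

-- ===== PORT A =====
-- state = (max_jump_before, max_jump, cum_sum, max_cum_sum); Python's -inf sentinels
-- for max_jump / max_cum_sum are ported as `none` (an int compares > -inf always,
-- which the `none` branches reproduce exactly).  `mj.getD st.1` ports the assignment
-- `max_jump_before = max_jump`: at that point max_jump was already set this iteration,
-- so the default is never used.
def pvStepA (differences : List Int) (st : Int × Option Int × Int × Option Int) (i : Int) :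
    Int × Option Int × Int × Option Int :=
  let d := PySem.List.pyGetD differences i 0
  let cs := st.2.2.1 + d
  let mj : Option Int := match st.2.1 with
    | none => some d
    | some v => if v < d then some d else some v
  let upd : Bool := match st.2.2.2 with
    | none => true
    | some m => decide (m < cs)
  if upd then (mj.getD st.1, mj, cs, some cs) else (st.1, mj, cs, st.2.2.2)

def biggest_jump (n : Int) (differences : List Int) : Int :=
  ((PySem.List.pyRange 0 n 1).foldl (pvStepA differences) (0, none, 0, none)).1

-- ===== PORT B =====
-- state = (cum, best, arg); `best is None` is `none` here.
def pvStepB (differences : List Int) (st : Int × Option Int × Int) (i : Int) :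
    Int × Option Int × Int :=
  let cum := st.1 + PySem.List.pyGetD differences i 0
  match st.2.1 with
  | none => (cum, some cum, i)
  | some b => if b < cum then (cum, some cum, i) else (cum, st.2.1, st.2.2)

-- `max(differences[:arg+1])` is PySem.List.max? of the slice; the slice is nonempty
-- (arg ≥ 0, n ≥ 1 ≤ len) so the `.getD 0` default is never used.
def biggest_jump_alt (n : Int) (differences : List Int) : Int :=
  if n ≤ 0 then 0
  else
    let st := (PySem.List.pyRange 0 n 1).foldl (pvStepB differences) (0, none, 0)
    (PySem.List.max? (PySem.List.slice differences none (some (st.2.2 + 1))) (fun x => x)).getD 0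

-- ===== PRECONDITION & SPEC =====
-- Pre_ excludes exactly the inputs where A raises IndexError (n > len(differences)).
def Pre_biggest_jump (n : Int) (differences : List Int) : Prop :=
  n ≤ (differences.length : Int)
instance (n : Int) (differences : List Int) : Decidable (Pre_biggest_jump n differences) := by
  unfold Pre_biggest_jump; infer_instance

def pvWitness_biggest_jump : Int × List Int := (3, [2, -1, 4])

def Spec_biggest_jump (n : Int) (differences : List Int) (out : Int) : Prop := out = biggest_jump_alt n differences
instance (n : Int) (differences : List Int) (out : Int) : Decidable (Spec_biggest_jump n differences out) := by unfold Spec_biggest_jump; infer_instance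

-- ===== CLAIM (what is proved, stated in full; the proofs are below) =====
def Claim_equal_biggest_jump : Prop := ∀ (n : Int) (differences : List Int), Dom_biggest_jump n differences → Pre_biggest_jump n differences → Spec_biggest_jump n differences (biggest_jump n differences)

-- ===== LEMMAS AND PROOFS =====

-- A's running `max_jump` is exactly PySem.List.max? (they are the same fold).
theorem pvMax?_concat (l : List Int) (x : Int) :
    PySem.List.max? (l ++ [x]) (fun y => y) =
      match PySem.List.max? l (fun y => y) with
      | none => some x
      | some v => if v < x then some x else some v := by
  cases h : PySem.List.max? l (fun y => y) with
  | none =>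
    simp only [PySem.List.max?, List.foldl_append, List.foldl_cons, List.foldl_nil] at h ⊢
    rw [h]
  | some v =>
    simp only [PySem.List.max?, List.foldl_append, List.foldl_cons, List.foldl_nil] at h ⊢
    rw [h]

theorem pvInvariant (differences : List Int) (m : Nat) (h1 : 1 ≤ m) :
    m ≤ differences.length →
    ∃ (arg cs : Int) (mcs mjA : Int),
      (PySem.List.pyRange 0 (m : Int) 1).foldl (pvStepB differences) (0, none, 0)
        = (cs, some mcs, arg) ∧
      (PySem.List.pyRange 0 (m : Int) 1).foldl (pvStepA differences) (0, none, 0, none)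
        = (mjA, PySem.List.max? (differences.take m) (fun y => y), cs, some mcs) ∧
      0 ≤ arg ∧ arg < (m : Int) ∧
      PySem.List.max? (differences.take (arg.toNat + 1)) (fun y => y) = some mjA := by
  induction m, h1 using Nat.le_induction with
  | base =>
    intro h2
    obtain ⟨d, rest, rfl⟩ : ∃ d rest, differences = d :: rest := by
      cases differences with
      | nil => simp at h2
      | cons a l => exact ⟨a, l, rfl⟩
    have hr : PySem.List.pyRange 0 (1 : Int) 1 = [0] := by decide
    refine ⟨0, d, d, d, ?_, ?_, by omega, by omega, ?_⟩ <;>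
      simp [hr, pvStepA, pvStepB, PySem.List.pyGetD_zero_cons, PySem.List.max?]
  | succ k hk ih =>
    intro h2
    obtain ⟨arg, cs, mcs, mjA, hB, hA, harg0, hargk, hmax⟩ := ih (by omega)
    have hklen : k < differences.length := by omega
    have hr : PySem.List.pyRange 0 (((k+1:Nat)) : Int) 1
        = PySem.List.pyRange 0 (k : Int) 1 ++ [(k : Int)] := by
      push_cast
      exact PySem.List.pyRange_one_succ_right (by positivity)
    have hd : PySem.List.pyGetD differences ((k : Nat) : Int) 0 = differences[k] := by
      rw [PySem.List.pyGetD_eq_getElem differences 0 (by positivity) (by exact_mod_cast hklen)]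
      simp
    have htake : differences.take (k+1) = differences.take k ++ [differences[k]] := by
      rw [List.take_add_one]; simp [List.getElem?_eq_getElem hklen]
    rw [hr]
    simp only [List.foldl_append, List.foldl_cons, List.foldl_nil, hA, hB]
    by_cases hlt : mcs < cs + differences[k]
    · -- update fires in both
      have hne : differences.take (k+1) ≠ [] := by
        apply List.ne_nil_of_length_pos
        simp only [List.length_take]
        omega
      obtain ⟨v, hv⟩ : ∃ v, PySem.List.max? (differences.take (k+1)) (fun y => y) = some v := by
        cases hvv : PySem.List.max? (differences.take (k+1)) (fun y => y) with
        | none => exact absurd ((PySem.List.max?_eq_none_iff _ _).mp hvv) hne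
        | some v => exact ⟨v, rfl⟩
      refine ⟨(k : Int), cs + differences[k], cs + differences[k], v, ?_, ?_, by positivity, by omega, ?_⟩
      · simp [pvStepB, hd, hlt]
      · have : PySem.List.max? (differences.take (k+1)) (fun y => y)
            = match PySem.List.max? (differences.take k) (fun y => y) with
              | none => some differences[k]
              | some w => if w < differences[k] then some differences[k] else some w := by
          rw [htake, pvMax?_concat]
        simp [pvStepA, hd, hlt, ← this, hv]
      · simpa using hv
    · -- no update
      refine ⟨arg, cs + differences[k], mcs, mjA, ?_, ?_, harg0, by omega, hmax⟩
      · simp [pvStepB, hd, hlt]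
      · have : PySem.List.max? (differences.take (k+1)) (fun y => y)
            = match PySem.List.max? (differences.take k) (fun y => y) with
              | none => some differences[k]
              | some w => if w < differences[k] then some differences[k] else some w := by
          rw [htake, pvMax?_concat]
        simp [pvStepA, hd, hlt, ← this]

theorem biggest_jump_spec : Claim_equal_biggest_jump := by
  intro n differences _ hpre
  unfold Spec_biggest_jump biggest_jump biggest_jump_alt
  by_cases hn : n ≤ 0
  · rw [if_pos hn, PySem.List.pyRange_one_eq_nil hn]
    rfl
  · rw [if_neg hn]
    rw [Int.not_le] at hn
    have hm1 : 1 ≤ n.toNat := by omega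
    have hm2 : n.toNat ≤ differences.length := by
      unfold Pre_biggest_jump at hpre; omega
    obtain ⟨arg, cs, mcs, mjA, hB, hA, harg0, hargn, hmax⟩ :=
      pvInvariant differences n.toNat hm1 hm2
    have hcast : ((n.toNat : Nat) : Int) = n := by omega
    rw [hcast] at hB hA
    rw [hA, hB]
    show mjA = (PySem.List.max? (PySem.List.slice differences none (some (arg + 1))) (fun x => x)).getD 0
    have h1 : (0:Int) ≤ arg + 1 := by omega
    rw [PySem.List.slice_to differences h1]
    have h2 : (arg + 1).toNat = arg.toNat + 1 := by omega
    rw [h2, hmax]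
    rfl
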